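-- pv_equiv track=rewrite | github.com/SrilakshmiSripathi/Data_Structures_and_Algorithms_Practice | PersonalPractice/Python@PersonalPractice/Strings/reverseString.py | reverse_words_order_and_swap_cases
-- ===== SOURCE A (Python) =====
-- def reverse_words_order_and_swap_cases(sentence):
--     reversedString = ""
--
--     newSentence = sentence[::-1].split(" ")
--
--     for i in newSentence:
--         newi = i[::-1]
--
--         for j in newi:
--
--             if j.isupper():
--                 reversedString += j.lower()
--             elif j.islower():
--                 reversedString += j.upper()
--             else:
--                 # if the string contains number or symbol, adding as it is
--                 reversedString += j
--         reversedString +=  " "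
--     return reversedString
-- ===== SOURCE B (Python) =====
-- def reverse_words_order_and_swap_cases(sentence):
--     # Consume words left-to-right, building the output back-to-front:
--     # each processed word (plus its space) is PREPENDED, so no string,
--     # word or list reversal is ever performed.
--     out = ""
--     rest = sentence
--     while " " in rest:
--         word, rest = rest.split(" ", 1)
--         out = word.swapcase() + " " + out
--     return rest.swapcase() + " " + out
-- ===== Notes on version B (the rewrite author's own statement) =====
-- stated objective: alternative
-- what changed: B performs no reversal at all: it consumes words left-to-right, splitting off the first word each iteration, and builds the result back-to-front by prepending each case-swapped word plus its space.
import Mathlib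
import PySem

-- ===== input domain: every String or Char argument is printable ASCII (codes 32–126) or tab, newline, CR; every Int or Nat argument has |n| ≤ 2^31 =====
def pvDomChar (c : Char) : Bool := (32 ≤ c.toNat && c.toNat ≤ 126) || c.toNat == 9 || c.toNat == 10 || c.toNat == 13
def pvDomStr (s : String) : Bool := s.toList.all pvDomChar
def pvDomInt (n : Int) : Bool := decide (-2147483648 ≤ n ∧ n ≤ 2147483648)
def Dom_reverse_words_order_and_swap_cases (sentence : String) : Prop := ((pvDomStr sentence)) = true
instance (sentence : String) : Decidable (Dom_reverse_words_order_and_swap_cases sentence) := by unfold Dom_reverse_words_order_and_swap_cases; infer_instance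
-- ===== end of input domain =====

-- B performs no reversal at all: it splits off the first word repeatedly and PREPENDS each
-- case-swapped word (back-to-front construction); same return value, different strategy.

-- ===== PORT A =====
-- Python: `if j.isupper(): j.lower() elif j.islower(): j.upper() else: j` on a one-char string
def pvSwapA (j : Char) : Char :=
  if PySem.Chars.isupper j then PySem.Chars.lowerChar j
  else if PySem.Chars.islower j then PySem.Chars.upperChar j
  else j

def reverse_words_order_and_swap_cases (sentence : String) : String :=
  -- sentence[::-1] is reversal, then .split(" ")
  let newSentence := PySem.Chars.splitOn sentence.toList.reverse [' ']
  String.ofList <| newSentence.foldl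
    (fun reversedString i =>
      -- newi = i[::-1]; the inner for-loop appends the swapped char each step, then one ' '
      (i.reverse.foldl (fun acc j => acc ++ [pvSwapA j]) reversedString) ++ [' '])
    []

-- ===== PORT B =====
-- str.swapcase per character; exact on the ASCII domain (Dom_) these theorems cover
def pvSwapB (c : Char) : Char :=
  if PySem.Chars.isupper c then PySem.Chars.lowerChar c
  else if PySem.Chars.islower c then PySem.Chars.upperChar c
  else c

-- the while loop of Source B: `rest.split(" ", 1)` is split at the first space
-- (takeWhile / dropWhile-then-drop-1 is exactly that split), the processed word is PREPENDED
def pvGoB (rest out : List Char) : List Char :=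
  if _h : ' ' ∈ rest then
    pvGoB ((rest.dropWhile (· ≠ ' ')).drop 1)
      ((rest.takeWhile (· ≠ ' ')).map pvSwapB ++ ' ' :: out)
  else (rest.map pvSwapB) ++ ' ' :: out
termination_by rest.length
decreasing_by
  have hne : rest.dropWhile (· ≠ ' ') ≠ [] := by
    intro hnil
    have := (List.dropWhile_eq_nil_iff).1 hnil ' ' _h
    simp at this
  have hle : (rest.dropWhile (· ≠ ' ')).length ≤ rest.length := List.length_dropWhile_le _ _
  have hpos : 0 < (rest.dropWhile (· ≠ ' ')).length := List.length_pos_of_ne_nil hne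
  simp only [List.length_drop]
  have : 0 < rest.length := List.length_pos_of_ne_nil (by rintro rfl; simp at _h)
  omega

def reverse_words_order_and_swap_cases_alt (sentence : String) : String :=
  String.ofList (pvGoB sentence.toList [])

-- ===== PRECONDITION & SPEC =====
def Spec_reverse_words_order_and_swap_cases (sentence : String) (out : String) : Prop := out = reverse_words_order_and_swap_cases_alt sentence
instance (sentence : String) (out : String) : Decidable (Spec_reverse_words_order_and_swap_cases sentence out) := by unfold Spec_reverse_words_order_and_swap_cases; infer_instance

-- ===== CLAIM (what is proved, stated in full; the proofs are below) =====
def Claim_equal_reverse_words_order_and_swap_cases : Prop := ∀ (sentence : String), Dom_reverse_words_order_and_swap_cases sentence → Spec_reverse_words_order_and_swap_cases sentence (reverse_words_order_and_swap_cases sentence)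

-- ===== LEMMAS AND PROOFS =====

-- proof-side structural model of PySem.Chars.splitOn · [' ']
def pvSp : List Char → List (List Char)
  | [] => [[]]
  | c :: r =>
    if c = ' ' then [] :: pvSp r
    else match pvSp r with
      | [] => [[c]]
      | w :: ws => (c :: w) :: ws

-- prepend to the head word
def pvCh (p : List Char) : List (List Char) → List (List Char)
  | [] => [p]
  | w :: ws => (p ++ w) :: ws

theorem pvSp_ne_nil (l : List Char) : pvSp l ≠ [] := by
  cases l with
  | nil => simp [pvSp]
  | cons c r =>
    simp only [pvSp]
    split
    · simp
    · split <;> simp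

theorem pvGo_eq (fuel : Nat) : ∀ (l cur : List Char) (acc : List (List Char)),
    l.length ≤ fuel →
    PySem.Chars.splitOn.go [' '] fuel l cur acc = acc.reverse ++ pvCh cur.reverse (pvSp l) := by
  induction fuel with
  | zero =>
    intro l cur acc h
    have : l = [] := by cases l <;> simp_all
    subst this
    simp [PySem.Chars.splitOn.go, pvSp, pvCh]
  | succ f ih =>
    intro l cur acc h
    cases l with
    | nil => simp [PySem.Chars.splitOn.go, pvSp, pvCh]
    | cons c rest =>
      by_cases hc : c = ' '
      · subst hc
        have hpre : List.isPrefixOf [' '] (' ' :: rest) = true := by simp [List.isPrefixOf]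
        simp only [PySem.Chars.splitOn.go, hpre, if_true, List.length_cons, List.length_nil,
          List.drop_succ_cons, List.drop_zero]
        rw [ih rest [] (cur.reverse :: acc) (by simpa using h)]
        have hne := pvSp_ne_nil rest
        cases hsp : pvSp rest with
        | nil => exact absurd hsp hne
        | cons w ws => simp [pvSp, pvCh, hsp]
      · have hpre : List.isPrefixOf [' '] (c :: rest) = false := by
          simp [List.isPrefixOf, Ne.symm hc]
        simp only [PySem.Chars.splitOn.go, hpre, Bool.false_eq_true, if_false]
        rw [ih rest (c :: cur) acc (by simpa using h)]
        have hne := pvSp_ne_nil rest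
        cases hsp : pvSp rest with
        | nil => exact absurd hsp hne
        | cons w ws => simp [pvSp, pvCh, hsp, hc]

theorem pvSplitOn_eq_sp (l : List Char) : PySem.Chars.splitOn l [' '] = pvSp l := by
  show PySem.Chars.splitOn.go [' '] (l.length + 1) l [] [] = pvSp l
  rw [pvGo_eq (l.length + 1) l [] [] (by omega)]
  have hne := pvSp_ne_nil l
  cases hsp : pvSp l with
  | nil => exact absurd hsp hne
  | cons w ws => simp [pvCh]

theorem pvSp_snoc_space (ys : List Char) : pvSp (ys ++ [' ']) = pvSp ys ++ [[]] := by
  induction ys with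
  | nil => simp [pvSp]
  | cons y r ih =>
    by_cases hy : y = ' '
    · subst hy; simp [pvSp, ih]
    · simp only [List.cons_append, pvSp, hy, if_false, ih]
      have hne := pvSp_ne_nil r
      cases hsp : pvSp r with
      | nil => exact absurd hsp hne
      | cons w ws => simp

theorem pvLastEq {α : Type} (xs ys : List α) (x y : α) (h : xs ++ [x] = ys ++ [y]) :
    xs = ys ∧ x = y := by
  obtain ⟨h1, h2⟩ := List.append_inj' h (by simp)
  exact ⟨h1, by simpa using h2⟩

theorem pvSp_snoc_char (c : Char) (hc : ¬ c = ' ') : ∀ (ys : List Char) (zs : List (List Char)) (z : List Char),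
    pvSp ys = zs ++ [z] → pvSp (ys ++ [c]) = zs ++ [z ++ [c]] := by
  intro ys
  induction ys with
  | nil =>
    intro zs z h
    simp only [pvSp] at h
    obtain ⟨h1, h2⟩ := pvLastEq [] zs [] z (by simpa using h)
    subst h1; subst h2
    simp [pvSp, hc]
  | cons y r ih =>
    intro zs z h
    obtain ⟨qs, q, hq⟩ : ∃ qs q, pvSp r = qs ++ [q] :=
      ⟨(pvSp r).dropLast, (pvSp r).getLast (pvSp_ne_nil r),
        (List.dropLast_append_getLast (pvSp_ne_nil r)).symm⟩
    have hrc := ih qs q hq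
    by_cases hy : y = ' '
    · subst hy
      simp only [pvSp, if_true, hq] at h
      obtain ⟨h1, h2⟩ := pvLastEq ([] :: qs) zs q z (by simp only [List.cons_append]; exact h)
      subst h1; subst h2
      simp only [List.cons_append, pvSp, if_true, hrc]
    · simp only [pvSp, hy, if_false, hq] at h
      cases qs with
      | nil =>
        simp only [List.nil_append] at h hrc
        obtain ⟨h1, h2⟩ := pvLastEq [] zs (y :: q) z (by simpa using h)
        subst h1; subst h2
        simp [pvSp, hy, hrc]
      | cons p ps =>
        simp only [List.cons_append] at h
        obtain ⟨h1, h2⟩ := pvLastEq ((y :: p) :: ps) zs q z (by simp only [List.cons_append]; exact h)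
        subst h1; subst h2
        simp only [List.cons_append, pvSp, hy, if_false, hrc]

theorem pvSp_reverse (l : List Char) : pvSp l.reverse = ((pvSp l).map List.reverse).reverse := by
  induction l with
  | nil => simp [pvSp]
  | cons c r ih =>
    by_cases hc : c = ' '
    · subst hc
      simp only [List.reverse_cons, pvSp_snoc_space, ih, pvSp, if_true]
      simp
    · have hne := pvSp_ne_nil r
      cases hsp : pvSp r with
      | nil => exact absurd hsp hne
      | cons w ws =>
        have hih : pvSp r.reverse = (ws.map List.reverse).reverse ++ [w.reverse] := by
          rw [ih, hsp]; simp
        have := pvSp_snoc_char c hc r.reverse ((ws.map List.reverse).reverse) w.reverse hih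
        simp only [List.reverse_cons, this, pvSp, hc, if_false, hsp]
        simp

theorem pvA_foldl (ws : List (List Char)) :
    ws.foldl (fun reversedString i =>
        (i.reverse.foldl (fun acc j => acc ++ [pvSwapA j]) reversedString) ++ [' ']) [] =
      ws.flatMap (fun w => w.reverse.map pvSwapA ++ [' ']) := by
  simp only [PySem.List.foldl_append_singleton_eq_map, List.append_assoc]
  simpa using PySem.List.foldl_append_eq_flatMap (fun w => w.reverse.map pvSwapA ++ [' ']) ws []

-- characterisation of pvSp when the list has no space / at its first space
theorem pvSp_no_space (l : List Char) (h : ' ' ∉ l) : pvSp l = [l] := by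
  induction l with
  | nil => simp [pvSp]
  | cons c r ih =>
    have hc : ¬ c = ' ' := by rintro rfl; exact h (by simp)
    have hr : ' ' ∉ r := fun hm => h (by simp [hm])
    simp [pvSp, hc, ih hr]

theorem pvSp_decomp (l : List Char) (h : ' ' ∈ l) :
    pvSp l = l.takeWhile (· ≠ ' ') :: pvSp ((l.dropWhile (· ≠ ' ')).drop 1) := by
  induction l with
  | nil => simp at h
  | cons c r ih =>
    by_cases hc : c = ' '
    · subst hc; simp [pvSp, List.takeWhile, List.dropWhile]
    · have hr : ' ' ∈ r := by cases h with | head => exact absurd rfl hc | tail _ h => exact h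
      have hne := pvSp_ne_nil ((r.dropWhile (· ≠ ' ')).drop 1)
      simp only [pvSp, hc, if_false, ih hr, List.takeWhile, List.dropWhile]
      simp [hc]

-- the loop invariant of B: pvGoB appends the processed reversed-word-list in front of `out`
theorem pvGoB_eq (n : Nat) : ∀ (l out : List Char), l.length ≤ n →
    pvGoB l out = ((pvSp l).reverse).flatMap (fun w => w.map pvSwapB ++ [' ']) ++ out := by
  induction n with
  | zero =>
    intro l out h
    have : l = [] := by cases l <;> simp_all
    subst this
    rw [pvGoB]
    simp [pvSp]
  | succ n ih =>
    intro l out h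
    by_cases hm : ' ' ∈ l
    · rw [pvGoB]
      simp only [hm, dif_pos]
      have hlen : ((l.dropWhile (· ≠ ' ')).drop 1).length ≤ n := by
        have hne : l.dropWhile (· ≠ ' ') ≠ [] := by
          intro hnil
          have := (List.dropWhile_eq_nil_iff).1 hnil ' ' hm
          simp at this
        have hle : (l.dropWhile (· ≠ ' ')).length ≤ l.length := List.length_dropWhile_le _ _
        have hpos : 0 < (l.dropWhile (· ≠ ' ')).length := List.length_pos_of_ne_nil hne
        simp only [List.length_drop]
        omega
      rw [ih _ _ hlen, pvSp_decomp l hm]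
      simp [List.flatMap_append]
    · rw [pvGoB]
      simp only [hm, dif_neg, not_false_iff]
      rw [pvSp_no_space l hm]
      simp

theorem pvSwap_eq : pvSwapB = pvSwapA := rfl

-- ===== VERDICT (by name: the statement is the Claim_ definition above) =====
theorem reverse_words_order_and_swap_cases_spec : Claim_equal_reverse_words_order_and_swap_cases := by
  intro sentence _
  unfold Spec_reverse_words_order_and_swap_cases
  unfold reverse_words_order_and_swap_cases reverse_words_order_and_swap_cases_alt
  simp only [pvSplitOn_eq_sp, pvSp_reverse, pvA_foldl]
  rw [pvGoB_eq (sentence.toList.length) _ _ (le_refl _)]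
  congr 1
  rw [← List.map_reverse, List.flatMap_map]
  simp [pvSwap_eq, List.append_nil]
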